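-- pv_equiv track=rewrite | github.com/Reapercrew666/crypt | plugin.video.fen/resources/lib/modules/indicators_bookmarks.py | get_watched_status_tvshow
-- ===== SOURCE A (Python) =====
-- def get_watched_status_tvshow(watched_info, use_trakt, media_id, aired_eps):
-- 	def get_playcount_overlay():
-- 		playcount, overlay = 0, 4
-- 		try:
-- 			if use_trakt:
-- 				watched = [i for i in watched_info if i[0] == media_id and i[1] == len(i[2])]
-- 				if watched:
-- 					playcount, overlay = 1, 5
-- 			else:
-- 				watched_list = [str(i[0]) for i in watched_info]
-- 				watched = len([i for i in watched_list if i == str(media_id)])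
-- 				if watched == aired_eps and not aired_eps == 0:
-- 					playcount, overlay = 1, 5
-- 		except: pass
-- 		return playcount, overlay
-- 	def get_watched_episode_totals():
-- 		watched, unwatched = 0, aired_eps
-- 		try:
-- 			if use_trakt:
-- 				watched = len([i[2] for i in watched_info if i[0] == media_id][0])
-- 				unwatched = [i[1] for i in watched_info if i[0] == media_id][0] - watched
-- 			else:
-- 				watched_list = [str(i[0]) for i in watched_info]
-- 				watched = len([i for i in watched_list if i == str(media_id)])
-- 				unwatched = aired_eps - watched
-- 		except: pass
-- 		return watched, unwatched
-- 	watched, unwatched = get_watched_episode_totals()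
-- 	playcount, overlay = get_playcount_overlay()
-- 	return playcount, overlay, watched, unwatched
-- ===== SOURCE B (Python) =====
-- def get_watched_status_tvshow(watched_info, use_trakt, media_id, aired_eps):
-- 	first = None       # (total, watched_len) of first entry matching media_id
-- 	count = 0          # number of entries matching media_id
-- 	any_full = False   # any matching entry fully watched (i[1] == len(i[2]))
-- 	for tid, total, eps in watched_info:
-- 		if tid == media_id:
-- 			if first is None:
-- 				first = (total, len(eps))
-- 			count += 1
-- 			if total == len(eps):
-- 				any_full = True
-- 	if use_trakt:
-- 		if first is None:
-- 			watched, unwatched = 0, aired_eps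
-- 		else:
-- 			total, w = first
-- 			watched, unwatched = w, total - w
-- 		playcount, overlay = (1, 5) if any_full else (0, 4)
-- 	else:
-- 		watched, unwatched = count, aired_eps - count
-- 		playcount, overlay = (1, 5) if (count == aired_eps and aired_eps != 0) else (0, 4)
-- 	return playcount, overlay, watched, unwatched
-- ===== Notes on version B (the rewrite author's own statement) =====
-- stated objective: alternative
-- what changed: Replaces A's four separate list comprehensions (two of them via str() conversions of every id, plus two [0]-indexed re-scans) with one left-to-right pass that records the first matching entry, the match count, and an any-fully-watched flag, then derives all four fields from that state.
import Mathlib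
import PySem

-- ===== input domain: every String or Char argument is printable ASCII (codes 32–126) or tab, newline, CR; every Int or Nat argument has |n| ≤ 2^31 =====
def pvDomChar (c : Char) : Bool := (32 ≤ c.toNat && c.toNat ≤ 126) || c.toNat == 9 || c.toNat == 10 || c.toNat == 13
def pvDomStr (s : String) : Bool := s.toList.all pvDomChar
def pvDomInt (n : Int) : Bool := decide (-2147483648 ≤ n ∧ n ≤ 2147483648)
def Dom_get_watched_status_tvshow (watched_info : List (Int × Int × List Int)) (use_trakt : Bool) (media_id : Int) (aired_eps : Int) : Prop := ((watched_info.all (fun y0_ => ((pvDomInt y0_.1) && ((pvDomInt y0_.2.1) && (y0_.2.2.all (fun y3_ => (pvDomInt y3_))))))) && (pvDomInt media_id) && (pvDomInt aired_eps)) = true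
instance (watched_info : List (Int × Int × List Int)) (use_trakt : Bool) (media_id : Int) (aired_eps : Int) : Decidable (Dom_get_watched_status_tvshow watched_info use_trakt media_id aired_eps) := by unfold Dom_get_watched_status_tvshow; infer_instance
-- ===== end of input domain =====

-- B replaces A's four re-scanning list comprehensions by a single left-to-right pass
-- over watched_info that records (first match, match count, any-fully-watched flag).


-- ===== PORT A =====
-- helper: inner def get_playcount_overlay (captures use_trakt, watched_info, media_id, aired_eps)
def pvA_playcount_overlay (watched_info : List (Int × Int × List Int)) (use_trakt : Bool) (media_id : Int) (aired_eps : Int) : Int × Int :=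
  if use_trakt then
    let watched := watched_info.filter (fun i => i.1 == media_id && i.2.1 == (i.2.2.length : Int))
    if !watched.isEmpty then (1, 5) else (0, 4)
  else
    let watched_list := watched_info.map (fun i => PySem.Int.toStr i.1)
    let watched : Int := (watched_list.filter (fun s => s == PySem.Int.toStr media_id)).length
    if watched == aired_eps && !(aired_eps == 0) then (1, 5) else (0, 4)

-- helper: inner def get_watched_episode_totals; the [0] indexings are PySem.List.pyGet? and a
-- 'none' (Python IndexError) falls to the enclosing 'except: pass', keeping the defaults
-- assigned so far (watched = 0, unwatched = aired_eps)
def pvA_totals (watched_info : List (Int × Int × List Int)) (use_trakt : Bool) (media_id : Int) (aired_eps : Int) : Int × Int :=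
  if use_trakt then
    match PySem.List.pyGet? ((watched_info.filter (fun i => i.1 == media_id)).map (fun i => i.2.2)) 0 with
    | none => (0, aired_eps)
    | some l =>
      let watched : Int := l.length
      match PySem.List.pyGet? ((watched_info.filter (fun i => i.1 == media_id)).map (fun i => i.2.1)) 0 with
      | none => (watched, aired_eps)
      | some t => (watched, t - watched)
  else
    let watched_list := watched_info.map (fun i => PySem.Int.toStr i.1)
    let watched : Int := (watched_list.filter (fun s => s == PySem.Int.toStr media_id)).length
    (watched, aired_eps - watched)

def get_watched_status_tvshow (watched_info : List (Int × Int × List Int)) (use_trakt : Bool) (media_id : Int) (aired_eps : Int) : Int × Int × Int × Int :=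
  let wu := pvA_totals watched_info use_trakt media_id aired_eps
  let po := pvA_playcount_overlay watched_info use_trakt media_id aired_eps
  (po.1, po.2, wu.1, wu.2)

-- ===== PORT B =====
-- the single pass: state = (first matching (total, len eps), match count, any-fully-watched)
def pvB_scan (media_id : Int) (watched_info : List (Int × Int × List Int)) : Option (Int × Int) × Int × Bool :=
  watched_info.foldl
    (fun st i =>
      if i.1 == media_id then
        (match st.1 with
         | none => some (i.2.1, (i.2.2.length : Int))
         | some p => some p,
         st.2.1 + 1,
         st.2.2 || (i.2.1 == (i.2.2.length : Int)))
      else st)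
    (none, 0, false)

def get_watched_status_tvshow_alt (watched_info : List (Int × Int × List Int)) (use_trakt : Bool) (media_id : Int) (aired_eps : Int) : Int × Int × Int × Int :=
  let st := pvB_scan media_id watched_info
  if use_trakt then
    let wu : Int × Int :=
      match st.1 with
      | none => (0, aired_eps)
      | some (total, w) => (w, total - w)
    let po : Int × Int := if st.2.2 then (1, 5) else (0, 4)
    (po.1, po.2, wu.1, wu.2)
  else
    let c := st.2.1
    let po : Int × Int := if c == aired_eps && !(aired_eps == 0) then (1, 5) else (0, 4)
    (po.1, po.2, c, aired_eps - c)

-- ===== PRECONDITION & SPEC =====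
def Spec_get_watched_status_tvshow (watched_info : List (Int × Int × List Int)) (use_trakt : Bool) (media_id : Int) (aired_eps : Int) (out : Int × Int × Int × Int) : Prop := out = get_watched_status_tvshow_alt watched_info use_trakt media_id aired_eps
instance (watched_info : List (Int × Int × List Int)) (use_trakt : Bool) (media_id : Int) (aired_eps : Int) (out : Int × Int × Int × Int) : Decidable (Spec_get_watched_status_tvshow watched_info use_trakt media_id aired_eps out) := by unfold Spec_get_watched_status_tvshow; infer_instance

-- ===== CLAIM (what is proved, stated in full; the proofs are below) =====
def Claim_equal_get_watched_status_tvshow : Prop := ∀ (watched_info : List (Int × Int × List Int)) (use_trakt : Bool) (media_id : Int) (aired_eps : Int), Dom_get_watched_status_tvshow watched_info use_trakt media_id aired_eps → Spec_get_watched_status_tvshow watched_info use_trakt media_id aired_eps (get_watched_status_tvshow watched_info use_trakt media_id aired_eps)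

-- ===== LEMMAS AND PROOFS =====

-- digit evaluation, to show Nat.toDigits 10 is injective
def pvDigitVal (c : Char) : Nat := c.toNat - 48

theorem pvToDigitsCore_foldl (f : Nat) : ∀ (n : Nat) (l : List Char), n < 10 ^ f →
    (Nat.toDigitsCore 10 f n l).foldl (fun a c => a * 10 + pvDigitVal c) 0
      = l.foldl (fun a c => a * 10 + pvDigitVal c) n := by
  induction f with
  | zero =>
    intro n l hn
    interval_cases n
    simp [Nat.toDigitsCore]
  | succ f ih =>
    intro n l hn
    rw [Nat.toDigitsCore]
    by_cases h : n / 10 = 0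
    · rw [if_pos h]
      simp only [List.foldl]
      have hn10 : n < 10 := by omega
      have : pvDigitVal (Nat.digitChar (n % 10)) = n % 10 := by
        interval_cases n <;> decide
      rw [this]
      congr 1
      omega
    · rw [if_neg h]
      have hlt : n / 10 < 10 ^ f := Nat.div_lt_of_lt_mul (by rw [Nat.mul_comm, ← Nat.pow_succ]; exact hn)
      rw [ih (n / 10) _ hlt]
      simp only [List.foldl]
      have : pvDigitVal (Nat.digitChar (n % 10)) = n % 10 := by
        have h10 : n % 10 < 10 := Nat.mod_lt _ (by norm_num)
        interval_cases h : n % 10 <;> decide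
      rw [this]
      congr 1
      omega

theorem pvToDigits_inj (m n : Nat) (h : Nat.toDigits 10 m = Nat.toDigits 10 n) : m = n := by
  have hm : m < 10 ^ (m + 1) := by
    calc m < 2 ^ (m + 1) := Nat.lt_two_pow_self.trans (Nat.pow_lt_pow_succ (by norm_num))
    _ ≤ 10 ^ (m + 1) := Nat.pow_le_pow_left (by norm_num) _
  have hn : n < 10 ^ (n + 1) := by
    calc n < 2 ^ (n + 1) := Nat.lt_two_pow_self.trans (Nat.pow_lt_pow_succ (by norm_num))
    _ ≤ 10 ^ (n + 1) := Nat.pow_le_pow_left (by norm_num) _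
  have h1 := pvToDigitsCore_foldl (m + 1) m [] hm
  have h2 := pvToDigitsCore_foldl (n + 1) n [] hn
  unfold Nat.toDigits at h
  rw [h] at h1
  simpa [h1] using h2

theorem pvToDigits_all_digit (f : Nat) : ∀ (n : Nat) (l : List Char),
    (∀ c ∈ l, 48 ≤ c.toNat ∧ c.toNat ≤ 57) →
    ∀ c ∈ Nat.toDigitsCore 10 f n l, 48 ≤ c.toNat ∧ c.toNat ≤ 57 := by
  induction f with
  | zero => intro n l hl; simpa [Nat.toDigitsCore] using hl
  | succ f ih =>
    intro n l hl
    have hd : 48 ≤ (Nat.digitChar (n % 10)).toNat ∧ (Nat.digitChar (n % 10)).toNat ≤ 57 := by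
      have h10 : n % 10 < 10 := Nat.mod_lt _ (by norm_num)
      interval_cases h : n % 10 <;> decide
    rw [Nat.toDigitsCore]
    by_cases h : n / 10 = 0
    · rw [if_pos h]
      intro c hc
      rcases List.mem_cons.mp hc with rfl | hc
      · exact hd
      · exact hl c hc
    · rw [if_neg h]
      exact ih (n / 10) _ (by
        intro c hc
        rcases List.mem_cons.mp hc with rfl | hc
        · exact hd
        · exact hl c hc)

theorem pvToChars_inj (a b : Int) (h : PySem.Int.toChars a = PySem.Int.toChars b) : a = b := by
  unfold PySem.Int.toChars at h
  have hmem : ∀ (n : Nat) (c : Char), c ∈ Nat.toDigits 10 n → 48 ≤ c.toNat ∧ c.toNat ≤ 57 := by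
    intro n c hc
    exact pvToDigits_all_digit (n + 1) n [] (by simp) c hc
  split_ifs at h with ha hb hb
  · have := pvToDigits_inj _ _ (List.cons.inj h).2
    omega
  · exfalso
    have : '-' ∈ Nat.toDigits 10 b.toNat := h ▸ List.mem_cons_self
    have := hmem _ _ this
    simp at this
  · exfalso
    have : '-' ∈ Nat.toDigits 10 a.toNat := h ▸ List.mem_cons_self
    have := hmem _ _ this
    simp at this
  · have := pvToDigits_inj _ _ h
    omega

theorem pvToStr_beq (a b : Int) : (PySem.Int.toStr a == PySem.Int.toStr b) = (a == b) := by
  by_cases h : a = b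
  · simp [h]
  · have : PySem.Int.toStr a ≠ PySem.Int.toStr b := by
      intro he
      apply h
      apply pvToChars_inj
      rw [← PySem.Int.toList_toStr, ← PySem.Int.toList_toStr, he]
    simp [this, h]

-- characterization of the single pass
theorem pvB_scan_spec (media_id : Int) (watched_info : List (Int × Int × List Int)) :
    pvB_scan media_id watched_info =
      (((watched_info.filter (fun i => i.1 == media_id)).head?).map (fun i => (i.2.1, (i.2.2.length : Int))),
       ((watched_info.filter (fun i => i.1 == media_id)).length : Int),
       watched_info.any (fun i => i.1 == media_id && i.2.1 == (i.2.2.length : Int))) := by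
  unfold pvB_scan
  suffices h : ∀ (l : List (Int × Int × List Int)) (st : Option (Int × Int) × Int × Bool),
      l.foldl (fun st i =>
        if i.1 == media_id then
          (match st.1 with
           | none => some (i.2.1, (i.2.2.length : Int))
           | some p => some p,
           st.2.1 + 1,
           st.2.2 || (i.2.1 == (i.2.2.length : Int)))
        else st) st =
      ((match st.1 with
        | none => ((l.filter (fun i => i.1 == media_id)).head?).map (fun i => (i.2.1, (i.2.2.length : Int)))
        | some p => some p),
       st.2.1 + ((l.filter (fun i => i.1 == media_id)).length : Int),
       st.2.2 || l.any (fun i => i.1 == media_id && i.2.1 == (i.2.2.length : Int))) by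
    rw [h]
    simp
  intro l
  induction l with
  | nil =>
    intro st
    obtain ⟨f, c, b⟩ := st
    cases f <;> simp
  | cons x xs ih =>
    intro st
    simp only [List.foldl_cons, List.filter_cons, List.any_cons]
    by_cases hx : x.1 = media_id
    · simp only [hx, beq_self_eq_true, if_pos, ih]
      cases hst : st.1 <;> simp [List.head?] <;> constructor <;> first | omega | (cases st.2.2 <;> simp)
    · have hb : (x.1 == media_id) = false := by simp [hx]
      simp only [hb, Bool.false_and, Bool.false_or, ih]
      simp

theorem pv_count_eq (media_id : Int) (watched_info : List (Int × Int × List Int)) :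
    ((watched_info.map (fun i => PySem.Int.toStr i.1)).filter (fun s => s == PySem.Int.toStr media_id)).length
      = (watched_info.filter (fun i => i.1 == media_id)).length := by
  rw [List.filter_map, List.length_map]
  congr 1
  apply List.filter_congr
  intro x _
  simp only [Function.comp]
  exact pvToStr_beq x.1 media_id

-- ===== VERDICT (by name: the statement is the Claim_ definition above) =====
theorem get_watched_status_tvshow_spec : Claim_equal_get_watched_status_tvshow := by
  intro watched_info use_trakt media_id aired_eps _
  unfold Spec_get_watched_status_tvshow
  unfold get_watched_status_tvshow get_watched_status_tvshow_alt pvA_totals pvA_playcount_overlay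
  rw [pvB_scan_spec]
  cases use_trakt with
  | false =>
    simp only [Bool.false_eq_true, if_neg (fun h => h)]
    rw [pv_count_eq]
  | true =>
    simp only [if_pos trivial]
    have hpg : ∀ (l : List (List Int)), PySem.List.pyGet? l 0 = l.head? := by
      intro l; cases l <;> simp [PySem.List.pyGet?, PySem.List.pyIdx?]
    have hpg2 : ∀ (l : List Int), PySem.List.pyGet? l 0 = l.head? := by
      intro l; cases l <;> simp [PySem.List.pyGet?, PySem.List.pyIdx?]
    rw [hpg, hpg2]
    cases hf : watched_info.filter (fun i => i.1 == media_id) with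
    | nil =>
      have hany : watched_info.any (fun i => i.1 == media_id && i.2.1 == (i.2.2.length : Int)) = false := by
        rw [List.any_eq_false]
        intro x hx
        simp only [Bool.and_eq_true, not_and, Bool.not_eq_true]
        intro h1
        exact False.elim (absurd (hf ▸ List.mem_filter.mpr ⟨hx, h1⟩ : _ ∈ ([] : List (Int × Int × List Int))) List.not_mem_nil)
      have hemp : (watched_info.filter (fun i => i.1 == media_id && i.2.1 == (i.2.2.length : Int))).isEmpty = true := by
        rw [List.isEmpty_iff, List.filter_eq_nil_iff]
        intro x hx
        simp only [Bool.and_eq_true, not_and, Bool.not_eq_true]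
        intro h1
        exact False.elim (absurd (hf ▸ List.mem_filter.mpr ⟨hx, h1⟩ : _ ∈ ([] : List (Int × Int × List Int))) List.not_mem_nil)
      simp [hany, hemp]
    | cons y ys =>
      have hanyeq : watched_info.any (fun i => i.1 == media_id && i.2.1 == (i.2.2.length : Int))
          = !(watched_info.filter (fun i => i.1 == media_id && i.2.1 == (i.2.2.length : Int))).isEmpty := by
        rw [Bool.eq_iff_iff]
        simp [List.any_eq_true, List.filter_eq_nil_iff]
      simp only [List.map_cons, List.head?, Option.map_some, hanyeq]
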